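-- pv_equiv track=rewrite | github.com/mdillondc/terminal-ai | src/search_log_engine.py | _find_first_match_line
-- ===== SOURCE A (Python) =====
-- from typing import Any, Dict, List, Optional, Tuple
--
-- def _find_first_match_line(lines: List[str], keywords: List[str], phrases: List[str]) -> Optional[int]:
--     # Prefer phrase matches, then keywords
--     lower_lines = [ln.lower() for ln in lines]
--     # Phrases
--     for ph in phrases or []:
--         ph_l = ph.lower()
--         for i, ln in enumerate(lower_lines):
--             if ph_l in ln:
--                 return i
--     # Keywords
--     for kw in keywords or []:
--         kw_l = kw.lower()
--         for i, ln in enumerate(lower_lines):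
--             if kw_l in ln:
--                 return i
--     return None
-- ===== SOURCE B (Python) =====
-- def _find_first_match_line(lines, keywords, phrases):
--     # Rank-based single pass: phrases get ranks before keywords; keep the
--     # lexicographically smallest (rank, line_index) seen over one scan of lines.
--     # Ranks at or above the current best can never improve it, so prune them.
--     terms = [t.lower() for t in (phrases or [])] + [t.lower() for t in (keywords or [])]
--     best = None  # (rank, line_index)
--     for i, ln in enumerate(lines):
--         ll = ln.lower()
--         for r, t in enumerate(terms):
--             if best is not None and r >= best[0]:
--                 break
--             if t in ll:
--                 best = (r, i)
--     return best[1] if best is not None else None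
-- ===== Notes on version B (the rewrite author's own statement) =====
-- stated objective: alternative
-- what changed: Replaced A's term-major nested scans with early return by a single line-major pass that assigns every term a priority rank (phrases first) and keeps the lexicographically smallest (rank, line_index) candidate.
import Mathlib
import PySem

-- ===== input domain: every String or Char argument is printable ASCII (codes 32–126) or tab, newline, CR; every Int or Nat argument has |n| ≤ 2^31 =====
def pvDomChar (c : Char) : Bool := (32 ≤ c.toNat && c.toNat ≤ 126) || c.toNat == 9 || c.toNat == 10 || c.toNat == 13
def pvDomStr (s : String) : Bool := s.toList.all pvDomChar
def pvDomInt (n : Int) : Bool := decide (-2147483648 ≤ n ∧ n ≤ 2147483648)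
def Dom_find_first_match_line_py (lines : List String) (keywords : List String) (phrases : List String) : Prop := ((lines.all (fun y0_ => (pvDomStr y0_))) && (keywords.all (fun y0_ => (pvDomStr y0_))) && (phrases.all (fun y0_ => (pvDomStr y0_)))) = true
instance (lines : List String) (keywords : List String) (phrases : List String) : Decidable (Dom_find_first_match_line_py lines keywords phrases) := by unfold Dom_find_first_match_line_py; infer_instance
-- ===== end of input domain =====

-- B replaces A's term-major nested scans (early return) by one line-major pass that
-- keeps the lexicographically smallest (term-rank, line-index) candidate: same result,
-- different decomposition (objective: alternative).

-- ===== PORT A =====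
-- inner 'for i, ln in enumerate(lower_lines): if t in ln: return i'
def aScanLines (t : String) : List String → Int → Option Int
  | [], _ => none
  | ln :: rest, i => if PySem.Str.isIn t ln then some i else aScanLines t rest (i + 1)

-- one of A's term loops: 'for x in xs: x_l = x.lower(); <scan lines>'
def aScanTerms (lls : List String) : List String → Option Int
  | [] => none
  | t :: rest =>
    match aScanLines (PySem.Str.lower t) lls 0 with
    | some i => some i
    | none => aScanTerms lls rest

def find_first_match_line_py (lines : List String) (keywords : List String) (phrases : List String) : Option Int :=
  let lowerLines := lines.map PySem.Str.lower
  match aScanTerms lowerLines phrases with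
  | some i => some i
  | none => aScanTerms lowerLines keywords

-- ===== PORT B =====
-- 'for r, t in enumerate(terms): if best is not None and r >= best[0]: break; if t in ll: best = (r, i)'
def bInner (ll : String) : List String → Int → Option (Int × Int) → Int → Option (Int × Int)
  | [], _, best, _ => best
  | t :: rest, r, best, i =>
    if (match best with | none => false | some (br, _) => decide (br ≤ r)) = true then best
    else bInner ll rest (r + 1) (if PySem.Str.isIn t ll then some (r, i) else best) i

-- 'for i, ln in enumerate(lines): ll = ln.lower(); <inner loop>'
def bOuter (terms : List String) : List String → Int → Option (Int × Int) → Option (Int × Int)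
  | [], _, best => best
  | ln :: rest, i, best => bOuter terms rest (i + 1) (bInner (PySem.Str.lower ln) terms 0 best i)

def find_first_match_line_py_alt (lines : List String) (keywords : List String) (phrases : List String) : Option Int :=
  let terms := phrases.map PySem.Str.lower ++ keywords.map PySem.Str.lower
  match bOuter terms lines 0 none with
  | some (_, i) => some i
  | none => none

-- ===== PRECONDITION & SPEC =====
def Spec_find_first_match_line_py (lines : List String) (keywords : List String) (phrases : List String) (out : Option Int) : Prop := out = find_first_match_line_py_alt lines keywords phrases
instance (lines : List String) (keywords : List String) (phrases : List String) (out : Option Int) : Decidable (Spec_find_first_match_line_py lines keywords phrases out) := by unfold Spec_find_first_match_line_py; infer_instance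

-- ===== CLAIM (what is proved, stated in full; the proofs are below) =====
def Claim_equal_find_first_match_line_py : Prop := ∀ (lines : List String) (keywords : List String) (phrases : List String), Dom_find_first_match_line_py lines keywords phrases → Spec_find_first_match_line_py lines keywords phrases (find_first_match_line_py lines keywords phrases)

-- ===== LEMMAS AND PROOFS =====

-- first matching rank of a line, ranks counted from r0
def fmA (ll : String) : List String → Int → Option Int
  | [], _ => none
  | t :: rest, r => if PySem.Str.isIn t ll then some r else fmA ll rest (r + 1)

-- 'combine best with this line's first matching rank'
def comb (b : Option (Int × Int)) (o : Option Int) (i : Int) : Option (Int × Int) :=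
  match o with
  | none => b
  | some r =>
    match b with
    | none => some (r, i)
    | some (br, bi) => if r < br then some (r, i) else some (br, bi)

def shiftB (b : Option (Int × Int)) : Option (Int × Int) := b.map (fun p => (p.1 + 1, p.2))

theorem fmA_ge (ll : String) : ∀ (ts : List String) (r0 r : Int), fmA ll ts r0 = some r → r0 ≤ r := by
  intro ts
  induction ts with
  | nil => intro r0 r h; simp [fmA] at h
  | cons t rest ih =>
    intro r0 r h
    by_cases hc : PySem.Chars.isIn t.toList ll.toList = true
    · simp [fmA, hc] at h; omega
    · simp [fmA, hc] at h
      have := ih (r0 + 1) r h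
      omega

theorem fmA_shift (ll : String) : ∀ (ts : List String) (r0 : Int), fmA ll ts (r0 + 1) = (fmA ll ts r0).map (fun r => r + 1) := by
  intro ts
  induction ts with
  | nil => intro r0; rfl
  | cons t rest ih =>
    intro r0
    by_cases hc : PySem.Chars.isIn t.toList ll.toList = true
    · simp [fmA, hc]
    · simp [fmA, hc, ih (r0 + 1)]

theorem comb_no_improve (br bi : Int) (o : Option Int) (i : Int)
    (h : ∀ r, o = some r → ¬ r < br) : comb (some (br, bi)) o i = some (br, bi) := by
  cases o with
  | none => rfl
  | some r => simp [comb, h r rfl]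

theorem bInner_eq (ll : String) : ∀ (ts : List String) (r0 : Int) (b : Option (Int × Int)) (i : Int),
    bInner ll ts r0 b i = comb b (fmA ll ts r0) i := by
  intro ts
  induction ts with
  | nil => intro r0 b i; cases b <;> rfl
  | cons t rest ih =>
    intro r0 b i
    have hrest : ∀ r, fmA ll rest (r0 + 1) = some r → r0 < r := by
      intro r hr
      have := fmA_ge ll rest (r0 + 1) r hr
      omega
    cases b with
    | none =>
      by_cases hc : PySem.Chars.isIn t.toList ll.toList = true
      · rw [show bInner ll (t :: rest) r0 none i = bInner ll rest (r0 + 1) (some (r0, i)) i from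
          by simp [bInner, hc]]
        rw [ih]
        rw [comb_no_improve _ _ _ _ (fun r hr => by have := hrest r hr; omega)]
        simp [fmA, hc, comb]
      · rw [show bInner ll (t :: rest) r0 none i = bInner ll rest (r0 + 1) none i from
          by simp [bInner, hc]]
        rw [ih]
        simp [fmA, hc]
    | some p =>
      obtain ⟨br, bi⟩ := p
      by_cases hbr : br ≤ r0
      · rw [show bInner ll (t :: rest) r0 (some (br, bi)) i = some (br, bi) from
          by simp [bInner, hbr]]
        rw [comb_no_improve _ _ _ _ (fun r hr => ?_)]
        by_cases hc : PySem.Chars.isIn t.toList ll.toList = true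
        · simp [fmA, hc] at hr; omega
        · simp [fmA, hc] at hr; have := hrest r hr; omega
      · by_cases hc : PySem.Chars.isIn t.toList ll.toList = true
        · rw [show bInner ll (t :: rest) r0 (some (br, bi)) i = bInner ll rest (r0 + 1) (some (r0, i)) i from
            by simp [bInner, hbr, hc]]
          rw [ih]
          rw [comb_no_improve _ _ _ _ (fun r hr => by have := hrest r hr; omega)]
          simp [fmA, hc, comb]
          omega
        · rw [show bInner ll (t :: rest) r0 (some (br, bi)) i = bInner ll rest (r0 + 1) (some (br, bi)) i from
            by simp [bInner, hbr, hc]]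
          rw [ih]
          simp [fmA, hc]

theorem bOuter_nil : ∀ (lines : List String) (i : Int) (b : Option (Int × Int)),
    bOuter [] lines i b = b := by
  intro lines
  induction lines with
  | nil => intro i b; rfl
  | cons ln rest ih => intro i b; simp only [bOuter, bInner]; exact ih _ _

theorem bOuter_keep_zero (ts : List String) : ∀ (lines : List String) (i0 bi : Int),
    bOuter ts lines i0 (some (0, bi)) = some (0, bi) := by
  intro lines
  induction lines with
  | nil => intro i0 bi; rfl
  | cons ln rest ih =>
    intro i0 bi
    simp only [bOuter, bInner_eq]
    rw [comb_no_improve]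
    · exact ih _ _
    · intro r hr
      have := fmA_ge (PySem.Str.lower ln) ts 0 r hr
      omega

theorem comb_shift (b : Option (Int × Int)) (o : Option Int) (i : Int) :
    comb (shiftB b) (o.map (fun r => r + 1)) i = shiftB (comb b o i) := by
  cases o with
  | none => rfl
  | some r =>
    cases b with
    | none => rfl
    | some p =>
      obtain ⟨br, bi⟩ := p
      by_cases h : r < br
      · simp [comb, shiftB, h]
      · have h2 : ¬ r + 1 < br + 1 := by omega
        simp [comb, shiftB, h, h2]

theorem bOuter_shift (t : String) (ts : List String) : ∀ (lines : List String),
    (∀ ln ∈ lines, PySem.Chars.isIn t.toList (PySem.Chars.lower ln.toList) = false) →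
    ∀ (i0 : Int) (b : Option (Int × Int)),
    bOuter (t :: ts) lines i0 (shiftB b) = shiftB (bOuter ts lines i0 b) := by
  intro lines
  induction lines with
  | nil => intro _ i0 b; rfl
  | cons ln rest ih =>
    intro h i0 b
    have hln := h ln (by simp)
    simp only [bOuter, bInner_eq]
    have hfm : fmA (PySem.Str.lower ln) (t :: ts) 0 = (fmA (PySem.Str.lower ln) ts 0).map (fun r => r + 1) := by
      have h1 : fmA (PySem.Str.lower ln) (t :: ts) 0 = fmA (PySem.Str.lower ln) ts 1 := by
        simp [fmA, hln]
      rw [h1]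
      have := fmA_shift (PySem.Str.lower ln) ts 0
      simpa using this
    rw [hfm, comb_shift]
    exact ih (fun x hx => h x (by simp [hx])) _ _

theorem bOuter_found (t : String) (ts : List String) : ∀ (lines : List String) (i0 : Int) (b : Option (Int × Int)) (j : Int),
    (∀ br bi, b = some (br, bi) → 0 < br) →
    aScanLines t (lines.map PySem.Str.lower) i0 = some j →
    bOuter (t :: ts) lines i0 b = some (0, j) := by
  intro lines
  induction lines with
  | nil => intro i0 b j _ h; simp [aScanLines] at h
  | cons ln rest ih =>
    intro i0 b j hb hscan
    by_cases hc : PySem.Chars.isIn t.toList (PySem.Chars.lower ln.toList) = true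
    · simp [aScanLines, hc] at hscan
      subst hscan
      simp only [bOuter, bInner_eq]
      have hfm : fmA (PySem.Str.lower ln) (t :: ts) 0 = some 0 := by simp [fmA, hc]
      rw [hfm]
      cases b with
      | none => exact bOuter_keep_zero _ _ _ _
      | some p =>
        obtain ⟨br, bi⟩ := p
        have hbr : (0 : Int) < br := hb br bi rfl
        simp only [comb, hbr, if_pos]
        exact bOuter_keep_zero _ _ _ _
    · simp [aScanLines, hc] at hscan
      simp only [bOuter, bInner_eq]
      have hfm : fmA (PySem.Str.lower ln) (t :: ts) 0 = fmA (PySem.Str.lower ln) ts 1 := by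
        simp [fmA, hc]
      rw [hfm]
      apply ih _ _ _ _ hscan
      intro br bi hbr
      cases hfm2 : fmA (PySem.Str.lower ln) ts 1 with
      | none =>
        rw [hfm2] at hbr
        simp only [comb] at hbr
        exact hb br bi hbr
      | some r =>
        have hr : (1 : Int) ≤ r := fmA_ge _ _ _ _ hfm2
        rw [hfm2] at hbr
        cases b with
        | none => simp only [comb] at hbr; injection hbr with h1; injection h1; omega
        | some q =>
          obtain ⟨qr, qi⟩ := q
          have hq : (0 : Int) < qr := hb qr qi rfl
          simp only [comb] at hbr
          split at hbr
          · injection hbr with h1; injection h1; omega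
          · injection hbr with h1; injection h1; omega

theorem scanLines_none (t : String) : ∀ (lines : List String) (i0 : Int),
    aScanLines t (lines.map PySem.Str.lower) i0 = none →
    ∀ ln ∈ lines, PySem.Chars.isIn t.toList (PySem.Chars.lower ln.toList) = false := by
  intro lines
  induction lines with
  | nil => intro _ _ ln h; simp at h
  | cons ln0 rest ih =>
    intro i0 h ln hln
    by_cases hc : PySem.Chars.isIn t.toList (PySem.Chars.lower ln0.toList) = true
    · simp [aScanLines, hc] at h
    · simp [aScanLines, hc] at h
      rcases List.mem_cons.mp hln with rfl | hln2
      · simpa using hc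
      · exact ih _ h ln hln2

-- A's term loop with terms already lowered
def aScanT (lls : List String) : List String → Option Int
  | [] => none
  | t :: rest =>
    match aScanLines t lls 0 with
    | some i => some i
    | none => aScanT lls rest

theorem aScanTerms_eq (lls : List String) : ∀ (ts : List String),
    aScanTerms lls ts = aScanT lls (ts.map PySem.Str.lower) := by
  intro ts
  induction ts with
  | nil => rfl
  | cons t rest ih => simp only [aScanTerms, List.map, aScanT, ih]

theorem aScanT_append (lls : List String) : ∀ (p k : List String),
    aScanT lls (p ++ k) = match aScanT lls p with | some i => some i | none => aScanT lls k := by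
  intro p k
  induction p with
  | nil => rfl
  | cons t rest ih =>
    simp only [List.cons_append, aScanT, ih]
    cases aScanLines t lls 0 <;> rfl

theorem main_eq : ∀ (ts lines : List String),
    aScanT (lines.map PySem.Str.lower) ts = (bOuter ts lines 0 none).map (fun p => p.2) := by
  intro ts
  induction ts with
  | nil => intro lines; rw [bOuter_nil]; rfl
  | cons t rest ih =>
    intro lines
    cases hscan : aScanLines t (lines.map PySem.Str.lower) 0 with
    | some j =>
      have := bOuter_found t rest lines 0 none j (by intro br bi h; simp at h) hscan
      simp only [aScanT, hscan, this, Option.map]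
    | none =>
      have hall := scanLines_none t lines 0 hscan
      have hsh := bOuter_shift t rest lines hall 0 none
      simp only [shiftB, Option.map_none] at hsh
      simp only [aScanT, hscan, ih lines, hsh]
      cases bOuter rest lines 0 none <;> rfl

-- ===== VERDICT (by name: the statement is the Claim_ definition above) =====
theorem find_first_match_line_py_spec : Claim_equal_find_first_match_line_py := by
  intro lines keywords phrases _
  unfold Spec_find_first_match_line_py
  show find_first_match_line_py lines keywords phrases = find_first_match_line_py_alt lines keywords phrases
  have hA : find_first_match_line_py lines keywords phrases =
      (match aScanTerms (lines.map PySem.Str.lower) phrases with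
       | some i => some i
       | none => aScanTerms (lines.map PySem.Str.lower) keywords) := rfl
  have hB : find_first_match_line_py_alt lines keywords phrases =
      (match bOuter (phrases.map PySem.Str.lower ++ keywords.map PySem.Str.lower) lines 0 none with
       | some (_, i) => some i
       | none => none) := rfl
  rw [hA, hB, aScanTerms_eq, aScanTerms_eq, ← aScanT_append, main_eq]
  cases bOuter (phrases.map PySem.Str.lower ++ keywords.map PySem.Str.lower) lines 0 none with
  | none => rfl
  | some p => obtain ⟨r, i⟩ := p; rfl
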